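-- pv_equiv track=rewrite | github.com/Apouuuuuuu/ChallengeFC | Reverse-Engineering/Niveau 3/Script.py | transformation_gamma
-- ===== SOURCE A (Python) =====
-- def transformation_gamma(text):
--     vowels = "aeiouAEIOU"
--     consonants = "bcdfghjklmnpqrstvwxyzBCDFGHJKLMNPQRSTVWXYZ"
--     result = ""
--
--     for char in text:
--         if char in vowels:
--             idx = vowels.index(char)
--             result += consonants[idx % len(consonants)]
--         elif char in consonants:
--             idx = consonants.index(char)
--             result += vowels[idx % len(vowels)]
--         else:
--             result += char
--     return result
-- ===== SOURCE B (Python) =====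
-- VOWEL_POS = (0, 4, 8, 14, 20)  # alphabet positions of a,e,i,o,u
--
-- def _gamma_char(c):
--     o = ord(c)
--     if 97 <= o <= 122:
--         up, p = 0, o - 97
--     elif 65 <= o <= 90:
--         up, p = 1, o - 65
--     else:
--         return c
--     r = (p > 0) + (p > 4) + (p > 8) + (p > 14) + (p > 20)
--     if p in VOWEL_POS:
--         return "bcdfghjklm"[r + 5 * up]
--     return "aeiouAEIOU"[(p - r + 21 * up) % 10]
--
-- def transformation_gamma(text):
--     return ''.join(_gamma_char(c) for c in text)
-- ===== Notes on version B (the rewrite author's own statement) =====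
-- stated objective: alternative
-- what changed: B replaces A's per-character membership tests and .index scans over the two alphabet strings by closed-form ord() arithmetic: it classifies each char by its code range, computes the vowel rank / consonant index from five comparisons against the vowel positions (0,4,8,14,20), and indexes two tiny constant strings; no alphabet is ever scanned.
import Mathlib
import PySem

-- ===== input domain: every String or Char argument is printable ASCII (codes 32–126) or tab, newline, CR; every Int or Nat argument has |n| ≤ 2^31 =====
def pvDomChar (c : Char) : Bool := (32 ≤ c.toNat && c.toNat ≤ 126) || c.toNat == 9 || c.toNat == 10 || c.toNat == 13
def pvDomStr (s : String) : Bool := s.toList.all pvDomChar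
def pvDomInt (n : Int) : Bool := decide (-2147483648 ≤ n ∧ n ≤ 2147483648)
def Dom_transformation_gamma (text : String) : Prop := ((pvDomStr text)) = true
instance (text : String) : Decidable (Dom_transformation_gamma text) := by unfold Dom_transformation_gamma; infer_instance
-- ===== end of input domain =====

-- B replaces A's alphabet scans (in / .index) by closed-form ord-code arithmetic per character; same result, no scanning.

-- ===== PORT A =====
def tgVowels : List Char := ['a','e','i','o','u','A','E','I','O','U']
def tgConsonants : List Char := ['b','c','d','f','g','h','j','k','l','m','n','p','q','r','s','t','v','w','x','y','z','B','C','D','F','G','H','J','K','L','M','N','P','Q','R','S','T','V','W','X','Y','Z']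

def transformation_gamma (text : String) : String :=
  String.mk (text.toList.foldl (fun result char =>
    if char ∈ tgVowels then
      result ++ [PySem.List.pyGetD tgConsonants ((tgVowels.idxOf char % tgConsonants.length : Nat) : Int) ' ']
    else if char ∈ tgConsonants then
      result ++ [PySem.List.pyGetD tgVowels ((tgConsonants.idxOf char % tgVowels.length : Nat) : Int) ' ']
    else
      result ++ [char]) [])

-- ===== PORT B =====
-- body shared by the two letter branches of _gamma_char (after up/p are set)
def tgLetter (up p : Int) : Char :=
  let r : Int := (if p > 0 then 1 else 0) + (if p > 4 then 1 else 0) +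
                 (if p > 8 then 1 else 0) + (if p > 14 then 1 else 0) + (if p > 20 then 1 else 0)
  if p = 0 ∨ p = 4 ∨ p = 8 ∨ p = 14 ∨ p = 20 then
    PySem.List.pyGetD "bcdfghjklm".toList (r + 5 * up) ' '
  else
    PySem.List.pyGetD "aeiouAEIOU".toList (PySem.Int.mod (p - r + 21 * up) 10) ' '

-- _gamma_char: classify by code range, then closed-form arithmetic (no alphabet scan)
def tgGammaChar (c : Char) : Char :=
  let o : Int := (c.toNat : Int)
  if 97 ≤ o ∧ o ≤ 122 then tgLetter 0 (o - 97)
  else if 65 ≤ o ∧ o ≤ 90 then tgLetter 1 (o - 65)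
  else c

def transformation_gamma_alt (text : String) : String :=
  String.mk (text.toList.map tgGammaChar)

-- ===== PRECONDITION & SPEC =====
def Spec_transformation_gamma (text : String) (out : String) : Prop := out = transformation_gamma_alt text
instance (text : String) (out : String) : Decidable (Spec_transformation_gamma text out) := by unfold Spec_transformation_gamma; infer_instance

-- ===== CLAIM (what is proved, stated in full; the proofs are below) =====
def Claim_equal_transformation_gamma : Prop := ∀ (text : String), Dom_transformation_gamma text → Spec_transformation_gamma text (transformation_gamma text)

-- ===== LEMMAS AND PROOFS =====

theorem tg_lower_mem (c : Char) (h1 : 97 ≤ c.toNat) (h2 : c.toNat ≤ 122) :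
    c ∈ tgVowels ∨ c ∈ tgConsonants := by
  have hofc : Char.ofNat c.toNat = c := Char.ofNat_toNat c
  set n := c.toNat with hn
  interval_cases n <;> (rw [← hofc]; decide)

theorem tg_upper_mem (c : Char) (h1 : 65 ≤ c.toNat) (h2 : c.toNat ≤ 90) :
    c ∈ tgVowels ∨ c ∈ tgConsonants := by
  have hofc : Char.ofNat c.toNat = c := Char.ofNat_toNat c
  set n := c.toNat with hn
  interval_cases n <;> (rw [← hofc]; decide)

set_option maxRecDepth 8192 in
theorem tg_char (c : Char) :
    (if c ∈ tgVowels then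
      PySem.List.pyGetD tgConsonants ((tgVowels.idxOf c % tgConsonants.length : Nat) : Int) ' '
    else if c ∈ tgConsonants then
      PySem.List.pyGetD tgVowels ((tgConsonants.idxOf c % tgVowels.length : Nat) : Int) ' '
    else c) = tgGammaChar c := by
  by_cases h1 : c ∈ tgVowels
  · rw [show tgVowels = ['a','e','i','o','u','A','E','I','O','U'] from rfl] at h1
    simp only [List.mem_cons, List.not_mem_nil, or_false] at h1
    rcases h1 with rfl|rfl|rfl|rfl|rfl|rfl|rfl|rfl|rfl|rfl <;> decide
  · by_cases h2 : c ∈ tgConsonants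
    · rw [show tgConsonants = ['b','c','d','f','g','h','j','k','l','m','n','p','q','r','s','t','v','w','x','y','z','B','C','D','F','G','H','J','K','L','M','N','P','Q','R','S','T','V','W','X','Y','Z'] from rfl] at h2
      simp only [List.mem_cons, List.not_mem_nil, or_false] at h2
      rcases h2 with rfl|rfl|rfl|rfl|rfl|rfl|rfl|rfl|rfl|rfl|rfl|rfl|rfl|rfl|rfl|rfl|rfl|rfl|rfl|rfl|rfl|rfl|rfl|rfl|rfl|rfl|rfl|rfl|rfl|rfl|rfl|rfl|rfl|rfl|rfl|rfl|rfl|rfl|rfl|rfl|rfl|rfl <;> decide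
    · have hlow : ¬ (97 ≤ c.toNat ∧ c.toNat ≤ 122) := by
        rintro ⟨ha, hb⟩
        have := tg_lower_mem c ha hb
        tauto
      have hup : ¬ (65 ≤ c.toNat ∧ c.toNat ≤ 90) := by
        rintro ⟨ha, hb⟩
        have := tg_upper_mem c ha hb
        tauto
      simp [h1, h2, tgGammaChar, hlow, hup]

theorem tg_fold (cs : List Char) (acc : List Char) :
    (cs.foldl (fun result char =>
      if char ∈ tgVowels then
        result ++ [PySem.List.pyGetD tgConsonants ((tgVowels.idxOf char % tgConsonants.length : Nat) : Int) ' ']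
      else if char ∈ tgConsonants then
        result ++ [PySem.List.pyGetD tgVowels ((tgConsonants.idxOf char % tgVowels.length : Nat) : Int) ' ']
      else
        result ++ [char]) acc)
    = acc ++ cs.map tgGammaChar := by
  induction cs generalizing acc with
  | nil => simp
  | cons c cs ih =>
    have hc := tg_char c
    simp only [List.foldl_cons, List.map_cons]
    by_cases h1 : c ∈ tgVowels
    · simp only [h1, if_true] at hc ⊢
      rw [ih, hc]; simp
    · by_cases h2 : c ∈ tgConsonants
      · simp only [h1, h2, if_true, if_false] at hc ⊢
        rw [ih, hc]; simp
      · simp only [h1, h2, if_false] at hc ⊢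
        rw [ih, ← hc]; simp

-- ===== VERDICT (by name: the statement is the Claim_ definition above) =====
theorem transformation_gamma_spec : Claim_equal_transformation_gamma := by
  intro text _
  unfold Spec_transformation_gamma transformation_gamma transformation_gamma_alt
  rw [tg_fold]
  simp
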